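-- pv_equiv track=rewrite | github.com/decredcommunity/network-stats | nodes/get_node_average.py | inverse_multidict
-- ===== SOURCE A (Python) =====
-- def inverse_multidict(md):
--     # compute an inverse multidict
--     # multidict is a dict that maps keys to lists of elements
--     # NOTE: there must be no duplicate elements across all lists!
--     inverse = {}
--     for k, v in md.items():
--         for e in v:
--             if e in inverse:
--                 raise Exception("duplicate elements in multidict values are not allowed")
--             inverse[e] = k
--     return inverse
-- ===== SOURCE B (Python) =====
-- def inverse_multidict(md):
--     # build the inverse in one shot, then detect duplicates by counting
--     inverse = {e: k for k, v in md.items() for e in v}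
--     total = sum(len(v) for v in md.values())
--     if len(inverse) != total:
--         raise Exception("duplicate elements in multidict values are not allowed")
--     return inverse
-- ===== Notes on version B (the rewrite author's own statement) =====
-- stated objective: simpler
-- what changed: B builds the entire inverse with a single dict comprehension and detects duplicates post-hoc by comparing the dict size with the total element count, instead of A's per-insertion membership check inside nested loops.
import Mathlib
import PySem

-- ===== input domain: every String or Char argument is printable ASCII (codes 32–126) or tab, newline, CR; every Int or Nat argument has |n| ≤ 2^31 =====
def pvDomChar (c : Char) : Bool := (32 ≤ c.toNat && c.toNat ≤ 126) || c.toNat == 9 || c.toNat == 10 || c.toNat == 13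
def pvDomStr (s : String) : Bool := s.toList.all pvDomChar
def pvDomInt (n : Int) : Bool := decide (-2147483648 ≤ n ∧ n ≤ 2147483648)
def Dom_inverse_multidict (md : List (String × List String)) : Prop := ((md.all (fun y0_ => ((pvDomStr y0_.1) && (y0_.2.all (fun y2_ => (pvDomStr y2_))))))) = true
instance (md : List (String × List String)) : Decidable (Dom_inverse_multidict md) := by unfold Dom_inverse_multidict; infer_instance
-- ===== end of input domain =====

-- B builds the whole inverse with one comprehension and detects duplicates post-hoc by a size/count
-- comparison, instead of A's per-insertion membership check (objective: simpler decomposition).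


-- ===== PORT A =====
-- A: nested loops; for each element, check membership in the accumulating dict (Python raises on a
-- hit; those inputs are excluded by Pre_, the branch keeps the dict unchanged there).
def inverse_multidict (md : List (String × List String)) : List (String × String) :=
  md.foldl (fun inverse kv =>
    kv.2.foldl (fun inv e =>
      if inv.any (fun p => p.1 == e) then inv  -- Python: raise Exception(...)  (outside Pre_)
      else inv ++ [(e, kv.1)]) inverse) []

-- ===== PORT B =====
-- Python dict insert/overwrite (insertion order kept, value overwritten in place).
def pvDictInsert (d : List (String × String)) (k v : String) : List (String × String) :=
  if d.any (fun p => p.1 == k) then d.map (fun p => if p.1 == k then (k, v) else p)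
  else d ++ [(k, v)]

def inverse_multidict_alt (md : List (String × List String)) : List (String × String) :=
  let pairs := md.flatMap (fun kv => kv.2.map (fun e => (e, kv.1)))
  let inv := pairs.foldl (fun d p => pvDictInsert d p.1 p.2) []
  let total := md.foldl (fun s kv => s + kv.2.length) 0
  if inv.length == total then inv else []  -- Python: raise Exception(...)  (outside Pre_)

-- ===== PRECONDITION & SPEC =====
-- Pre_ excludes exactly the inputs with a duplicate element across the value lists, on which the
-- Python A (and B) raises an Exception.
def Pre_inverse_multidict (md : List (String × List String)) : Prop :=
  (md.flatMap (fun kv => kv.2)).Nodup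
instance (md : List (String × List String)) : Decidable (Pre_inverse_multidict md) := by unfold Pre_inverse_multidict; infer_instance
def pvWitness_inverse_multidict : (List (String × List String)) := [("a", ["x", "y"]), ("b", ["z"])]
def Spec_inverse_multidict (md : List (String × List String)) (out : List (String × String)) : Prop := out = inverse_multidict_alt md
instance (md : List (String × List String)) (out : List (String × String)) : Decidable (Spec_inverse_multidict md out) := by unfold Spec_inverse_multidict; infer_instance

-- ===== CLAIM (what is proved, stated in full; the proofs are below) =====
def Claim_equal_inverse_multidict : Prop := ∀ (md : List (String × List String)), Dom_inverse_multidict md → Pre_inverse_multidict md → Spec_inverse_multidict md (inverse_multidict md)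

-- ===== LEMMAS AND PROOFS =====

-- the flattened (element, key) pair list both programs effectively traverse
def pvPairs (md : List (String × List String)) : List (String × String) :=
  md.flatMap (fun kv => kv.2.map (fun e => (e, kv.1)))

-- A's inner loop, when every element of v is fresh w.r.t. acc and v has no duplicates,
-- just appends the pairs.
theorem pvA_inner (k : String) (v : List String) (acc : List (String × String))
    (hfresh : ∀ e ∈ v, ∀ p ∈ acc, p.1 ≠ e) (hnd : v.Nodup) :
    v.foldl (fun inv e =>
      if inv.any (fun p => p.1 == e) then inv else inv ++ [(e, k)]) acc
      = acc ++ v.map (fun e => (e, k)) := by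
  induction v generalizing acc with
  | nil => simp
  | cons e v ih =>
    have hne : ¬ acc.any (fun p => p.1 == e) = true := by
      simp only [List.any_eq_true, beq_iff_eq, not_exists, not_and]
      intro p hp; exact hfresh e (by simp) p hp
    simp only [List.foldl_cons, if_neg hne]
    rw [ih (acc ++ [(e, k)])]
    · simp
    · intro e' he' p hp
      rcases List.mem_append.mp hp with h | h
      · exact hfresh e' (List.mem_cons_of_mem _ he') p h
      · simp only [List.mem_singleton] at h; subst h
        show e ≠ e'
        intro hc; subst hc
        exact (List.nodup_cons.mp hnd).1 he'
    · exact (List.nodup_cons.mp hnd).2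

-- A's whole fold, under freshness and global nodup of elements, appends pvPairs.
theorem pvA_eq (md : List (String × List String)) (acc : List (String × String))
    (hfresh : ∀ e ∈ md.flatMap (fun kv => kv.2), ∀ p ∈ acc, p.1 ≠ e)
    (hnd : (md.flatMap (fun kv => kv.2)).Nodup) :
    md.foldl (fun inverse kv =>
      kv.2.foldl (fun inv e =>
        if inv.any (fun p => p.1 == e) then inv else inv ++ [(e, kv.1)]) inverse) acc
      = acc ++ pvPairs md := by
  induction md generalizing acc with
  | nil => simp [pvPairs]
  | cons kv md ih =>
    simp only [List.flatMap_cons, List.nodup_append] at hnd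
    simp only [List.foldl_cons]
    rw [pvA_inner kv.1 kv.2 acc
        (fun e he p hp => hfresh e (by simp [he]) p hp) hnd.1]
    rw [ih (acc ++ kv.2.map (fun e => (e, kv.1)))]
    · simp [pvPairs]
    · intro e he p hp
      rcases List.mem_append.mp hp with h | h
      · exact hfresh e (by simp [he]) p h
      · simp only [List.mem_map] at h
        obtain ⟨e', he', rfl⟩ := h
        show e' ≠ e
        intro hc
        exact hnd.2.2 e' he' e he hc
    · exact hnd.2.1

-- B's fold: inserting always-fresh keys is appending.
theorem pvB_eq (l acc : List (String × String))
    (hfresh : ∀ q ∈ l, ∀ p ∈ acc, p.1 ≠ q.1) (hnd : (l.map Prod.fst).Nodup) :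
    l.foldl (fun d p => pvDictInsert d p.1 p.2) acc = acc ++ l := by
  induction l generalizing acc with
  | nil => simp
  | cons q l ih =>
    have hne : ¬ acc.any (fun p => p.1 == q.1) = true := by
      simp only [List.any_eq_true, beq_iff_eq, not_exists, not_and]
      intro p hp; exact hfresh q (by simp) p hp
    simp only [List.map_cons, List.nodup_cons] at hnd
    simp only [List.foldl_cons]
    have hstep : pvDictInsert acc q.1 q.2 = acc ++ [(q.1, q.2)] := by
      unfold pvDictInsert; rw [if_neg hne]
    rw [hstep, ih (acc ++ [(q.1, q.2)])]
    · simp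
    · intro q' hq' p hp
      rcases List.mem_append.mp hp with h | h
      · exact hfresh q' (List.mem_cons_of_mem _ hq') p h
      · simp only [List.mem_singleton] at h; subst h
        show q.1 ≠ q'.1
        intro hc
        exact hnd.1 (by rw [hc]; exact List.mem_map_of_mem hq')
    · exact hnd.2

-- keys of pvPairs are exactly the flattened elements
theorem pvPairs_keys (md : List (String × List String)) :
    (pvPairs md).map Prod.fst = md.flatMap (fun kv => kv.2) := by
  induction md with
  | nil => rfl
  | cons kv md ih =>
    simp only [pvPairs, List.flatMap_cons, List.map_append, List.map_map] at ih ⊢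
    rw [ih]
    congr 1
    simp only [Function.comp_def]
    exact List.map_id _

-- B's total equals the length of pvPairs
theorem pvTotal_eq (md : List (String × List String)) (s : Nat) :
    md.foldl (fun s kv => s + kv.2.length) s = s + (pvPairs md).length := by
  induction md generalizing s with
  | nil => simp [pvPairs]
  | cons kv md ih =>
    simp only [List.foldl_cons]
    rw [ih]
    simp [pvPairs]
    omega

-- ===== VERDICT (by name: the statement is the Claim_ definition above) =====
theorem inverse_multidict_spec : Claim_equal_inverse_multidict := by
  intro md _ hpre
  unfold Spec_inverse_multidict
  have hkeys := pvPairs_keys md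
  have hA := pvA_eq md [] (by simp) hpre
  have hB := pvB_eq (pvPairs md) [] (by simp)
    (by rw [hkeys]; exact hpre)
  have ht := pvTotal_eq md 0
  simp only [pvPairs] at hA hB ht
  simp only [inverse_multidict, inverse_multidict_alt, hA, hB, ht]
  simp
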